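-- pv_equiv track=rewrite | github.com/zahnsimo/AdventOfCode | AdventofCode/Aufgabe22/aufgabe22.py | parse_ins
-- ===== SOURCE A (Python) =====
-- def parse_ins(ins):
--     i = 0
--     path = []
--     next_R = ins.find("R")
--     next_L = ins.find("L")
--     while i < len(ins):
--         if next_R == -1:
--             next_R = len(ins)
--         if next_L == -1:
--             next_L = len(ins)
--         if next_R < next_L:
--             steps = int(ins[i:next_R])
--             path.append((steps,1))
--             i = next_R+1
--             next_R = ins.find("R" , i)
--         else:
--             steps = int(ins[i:next_L])
--             path.append((steps,-1))
--             i = next_L+1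
--             next_L = ins.find("L" , i)
--     (steps,dd) = path.pop(-1)
--     path.append((steps,0))
--     return path
-- ===== SOURCE B (Python) =====
-- def parse_ins(ins):
--     path = []
--     buf = []
--     for ch in ins:
--         if ch == "R" or ch == "L":
--             path.append((int("".join(buf)), 1 if ch == "R" else -1))
--             buf = []
--         else:
--             buf.append(ch)
--     if buf:
--         path.append((int("".join(buf)), 0))
--     else:
--         steps, _ = path[-1]
--         path[-1] = (steps, 0)
--     return path
-- ===== Notes on version B (the rewrite author's own statement) =====
-- stated objective: simpler
-- what changed: Replaces A's index bookkeeping (repeated str.find for R and L, slicing, and a final pop/re-append) with a single left-to-right character scan that accumulates the current number into a buffer and emits a pair at each letter, then handles the trailing chunk directly.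
-- outside the precondition, e.g. on parse_ins(''): A raises IndexError, B raises IndexError; on parse_ins('R5'): A raises ValueError, B raises ValueError; on parse_ins('5RL3'): A raises ValueError, B raises ValueError
import Mathlib
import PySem

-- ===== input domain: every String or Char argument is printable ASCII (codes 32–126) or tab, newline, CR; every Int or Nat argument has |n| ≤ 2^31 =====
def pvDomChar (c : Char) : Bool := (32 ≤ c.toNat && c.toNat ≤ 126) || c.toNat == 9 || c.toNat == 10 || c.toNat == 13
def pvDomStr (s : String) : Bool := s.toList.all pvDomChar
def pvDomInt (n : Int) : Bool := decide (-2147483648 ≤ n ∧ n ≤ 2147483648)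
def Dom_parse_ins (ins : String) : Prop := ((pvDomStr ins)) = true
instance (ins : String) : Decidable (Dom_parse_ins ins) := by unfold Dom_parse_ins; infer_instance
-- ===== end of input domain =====

-- B replaces A's repeated str.find / slice / final pop-and-reappend index bookkeeping by a single
-- left-to-right character scan with a digit buffer (objective: simpler).

-- ===== PORT A =====
-- int(s); a ValueError of int() (none) is excluded by Pre_parse_ins, so the default is never read there
def pvInt (cs : List Char) : Int := (PySem.Int.ofChars? cs).getD 0

-- the while loop of A; fuel only makes the recursion total (fuel = len+1 suffices: i strictly increases each iteration)
def parseLoopA (cs : List Char) (fuel : Nat) (i nR nL : Int) (path : List (Int × Int)) : List (Int × Int) :=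
  match fuel with
  | 0 => path
  | fuel + 1 =>
    if i < (cs.length : Int) then
      let nR' := if nR = -1 then (cs.length : Int) else nR   -- if next_R == -1: next_R = len(ins)
      let nL' := if nL = -1 then (cs.length : Int) else nL   -- if next_L == -1: next_L = len(ins)
      if nR' < nL' then
        parseLoopA cs fuel (nR' + 1) (PySem.Chars.findFrom cs ['R'] (nR' + 1) none) nL'
          (path ++ [(pvInt (PySem.List.slice cs (some i) (some nR')), 1)])
      else
        parseLoopA cs fuel (nL' + 1) nR' (PySem.Chars.findFrom cs ['L'] (nL' + 1) none)
          (path ++ [(pvInt (PySem.List.slice cs (some i) (some nL')), -1)])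
    else path

def parse_ins (ins : String) : List (Int × Int) :=
  let cs := ins.toList
  let path := parseLoopA cs (cs.length + 1) 0 (PySem.Chars.find cs ['R']) (PySem.Chars.find cs ['L']) []
  match path.getLast? with
  | some (steps, _) => path.dropLast ++ [(steps, 0)]   -- (steps,dd) = path.pop(-1); path.append((steps,0))
  | none => []                                         -- IndexError on empty path; excluded by Pre_parse_ins

-- ===== PORT B =====
-- one step of B's for-loop over the characters; state = (path, buf)
def parseStep (st : List (Int × Int) × List Char) (ch : Char) : List (Int × Int) × List Char :=
  if ch = 'R' then (st.1 ++ [(pvInt st.2, 1)], [])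
  else if ch = 'L' then (st.1 ++ [(pvInt st.2, -1)], [])
  else (st.1, st.2 ++ [ch])

def parse_ins_alt (ins : String) : List (Int × Int) :=
  let st := ins.toList.foldl parseStep ([], [])
  if st.2 ≠ [] then st.1 ++ [(pvInt st.2, 0)]
  else
    match st.1.getLast? with
    | some (steps, _) => st.1.dropLast ++ [(steps, 0)]   -- steps,_ = path[-1]; path[-1] = (steps, 0)
    | none => []                                         -- IndexError on "": excluded by Pre_parse_ins

-- ===== PRECONDITION & SPEC =====
-- Pre_ holds exactly where the Python A returns: A raises IndexError on "" and ValueError when a chunk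
-- between letters, or a non-empty trailing chunk, does not parse as an int (e.g. int('') on "R5" or "5RL3").
def Pre_parse_ins (ins : String) : Prop :=
  let chunks := PySem.Chars.splitOn (PySem.Chars.replace ins.toList ['L'] ['R']) ['R']
  ins.toList ≠ [] ∧ (∀ ch ∈ chunks.dropLast, PySem.Int.ofChars? ch ≠ none) ∧
    (chunks.getLast?.getD [] = [] ∨ PySem.Int.ofChars? (chunks.getLast?.getD []) ≠ none)
instance (ins : String) : Decidable (Pre_parse_ins ins) := by unfold Pre_parse_ins; infer_instance

def pvWitness_parse_ins : String := "10R5L2"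

def Spec_parse_ins (ins : String) (out : List (Int × Int)) : Prop := out = parse_ins_alt ins
instance (ins : String) (out : List (Int × Int)) : Decidable (Spec_parse_ins ins out) := by unfold Spec_parse_ins; infer_instance

-- ===== CLAIM (what is proved, stated in full; the proofs are below) =====
def Claim_equal_parse_ins : Prop := ∀ (ins : String), Dom_parse_ins ins → Pre_parse_ins ins → Spec_parse_ins ins (parse_ins ins)

-- ===== LEMMAS AND PROOFS =====

-- proof-side characterisation shared by both loops: the pairs emitted at each letter, and the trailing chunk
def pairsAux (buf : List Char) : List Char → List (Int × Int)
  | [] => []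
  | c :: t =>
    if c = 'R' then (pvInt buf, 1) :: pairsAux [] t
    else if c = 'L' then (pvInt buf, -1) :: pairsAux [] t
    else pairsAux (buf ++ [c]) t

def lastAux (buf : List Char) : List Char → List Char
  | [] => buf
  | c :: t => if c = 'R' then lastAux [] t else if c = 'L' then lastAux [] t else lastAux (buf ++ [c]) t

lemma foldl_parseStep (s : List Char) : ∀ (path : List (Int × Int)) (buf : List Char),
    s.foldl parseStep (path, buf) = (path ++ pairsAux buf s, lastAux buf s) := by
  induction s with
  | nil => intro path buf; simp [pairsAux, lastAux]
  | cons c t ih =>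
    intro path buf
    by_cases hR : c = 'R'
    · simp [parseStep, pairsAux, lastAux, hR, ih]
    · by_cases hL : c = 'L'
      · simp [parseStep, pairsAux, lastAux, hL, ih]
      · simp [parseStep, pairsAux, lastAux, hR, hL, ih]

lemma pairsAux_nonletter (w : List Char) (hw : ∀ c ∈ w, c ≠ 'R' ∧ c ≠ 'L') :
    ∀ (buf rest : List Char), pairsAux buf (w ++ rest) = pairsAux (buf ++ w) rest := by
  induction w with
  | nil => simp
  | cons c t ih =>
    intro buf rest
    have hc := hw c (by simp)
    have ht : ∀ c ∈ t, c ≠ 'R' ∧ c ≠ 'L' := fun x hx => hw x (by simp [hx])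
    simp [pairsAux, hc.1, hc.2, ih ht]

lemma lastAux_nonletter (w : List Char) (hw : ∀ c ∈ w, c ≠ 'R' ∧ c ≠ 'L') :
    ∀ (buf rest : List Char), lastAux buf (w ++ rest) = lastAux (buf ++ w) rest := by
  induction w with
  | nil => simp
  | cons c t ih =>
    intro buf rest
    have hc := hw c (by simp)
    have ht : ∀ c ∈ t, c ≠ 'R' ∧ c ≠ 'L' := fun x hx => hw x (by simp [hx])
    simp [lastAux, hc.1, hc.2, ih ht]

lemma singleton_prefix_iff (c : Char) (t : List Char) : [c] <+: t ↔ t.head? = some c := by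
  constructor
  · rintro ⟨u, rfl⟩; rfl
  · intro h; cases t with
    | nil => simp at h
    | cons x u => simp at h; exact ⟨u, by simp [h]⟩

-- Python find normalised by the loop's "-1 → len" step equals List.findIdx on the remaining suffix
lemma nrmFind (cs : List Char) (c : Char) (k : Nat) (hk : k ≤ cs.length) :
    (if PySem.Chars.findFrom cs [c] (k : Int) none = -1 then (cs.length : Int)
     else PySem.Chars.findFrom cs [c] (k : Int) none)
    = (k : Int) + ((cs.drop k).findIdx (· == c) : Int) := by
  rw [PySem.Chars.findFrom_natCast cs [c] k hk]
  by_cases h : PySem.Chars.find (cs.drop k) [c] = -1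
  · have hnm : c ∉ cs.drop k := by
      have := (PySem.Chars.find_eq_neg_one_iff (cs.drop k) [c]).mp h
      simpa [List.singleton_infix_iff] using this
    have hidx : (cs.drop k).findIdx (· == c) = (cs.drop k).length :=
      List.findIdx_eq_length.mpr (fun x hx => by
        simp only [beq_eq_false_iff_ne]
        exact fun hxc => hnm (hxc ▸ hx))
    rw [h, if_pos rfl, hidx]
    have hd : (cs.drop k).length = cs.length - k := List.length_drop
    omega
  · have hge : 0 ≤ PySem.Chars.find (cs.drop k) [c] := by
      have := PySem.Chars.neg_one_le_find (cs.drop k) [c]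
      omega
    obtain ⟨hpre, hmin⟩ := PySem.Chars.find_spec (s := cs.drop k) (sub := [c]) hge
    set f := PySem.Chars.find (cs.drop k) [c] with hf
    have hget : (cs.drop k)[f.toNat]? = some c := by
      have := (singleton_prefix_iff c _).mp hpre
      rwa [List.head?_drop] at this
    obtain ⟨hlt, hEq⟩ := List.getElem?_eq_some_iff.mp hget
    have hidx : (cs.drop k).findIdx (· == c) = f.toNat := by
      rw [List.findIdx_eq hlt]
      constructor
      · exact beq_iff_eq.mpr hEq
      · intro j hj
        have hne : (cs.drop k)[j]? ≠ some c := by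
          intro hsome
          exact hmin j hj ((singleton_prefix_iff c _).mpr (by rwa [List.head?_drop]))
        have hjlt : j < (cs.drop k).length := lt_trans hj hlt
        rw [List.getElem?_eq_getElem hjlt] at hne
        simp only [beq_eq_false_iff_ne]
        exact fun hc => hne (by rw [hc])
    rw [if_neg (by omega), hidx]
    omega

-- the invariant proof of A's while loop: at each loop entry the normalised next_R/next_L point at the
-- first 'R'/'L' of the unread suffix, and the loop emits exactly pairsAux plus the trailing chunk with turn -1
lemma loopA_eq (cs : List Char) : ∀ (fuel k : Nat) (nR nL : Int) (path : List (Int × Int)),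
    k ≤ cs.length → cs.length - k < fuel →
    ((if nR = -1 then (cs.length : Int) else nR) = (k : Int) + ((cs.drop k).findIdx (· == 'R') : Int)) →
    ((if nL = -1 then (cs.length : Int) else nL) = (k : Int) + ((cs.drop k).findIdx (· == 'L') : Int)) →
    parseLoopA cs fuel (k : Int) nR nL path
      = path ++ pairsAux [] (cs.drop k)
          ++ (if lastAux [] (cs.drop k) = [] then [] else [(pvInt (lastAux [] (cs.drop k)), -1)]) := by
  intro fuel
  induction fuel with
  | zero => intro k nR nL path hk hfuel _ _; omega
  | succ fuel ih =>
    intro k nR nL path hk hfuel hR hL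
    by_cases hklt : k < cs.length
    · -- loop body runs
      set s := cs.drop k with hs
      have hslen : s.length = cs.length - k := by rw [hs]; exact List.length_drop
      set kR := s.findIdx (· == 'R') with hkR
      set kL := s.findIdx (· == 'L') with hkL
      have hkRle : kR ≤ s.length := List.findIdx_le_length
      have hkLle : kL ≤ s.length := List.findIdx_le_length
      have hsne : s ≠ [] := by
        intro h
        rw [h] at hslen
        simp at hslen
        omega
      simp only [parseLoopA]
      rw [if_pos (by exact_mod_cast hklt), hR, hL]
      by_cases hcmp : kR < kL
      · -- an 'R' comes first
        have hkRlt : kR < s.length := lt_of_lt_of_le hcmp hkLle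
        obtain ⟨hgR, hbR⟩ := (List.findIdx_eq (p := (· == 'R')) hkRlt).mp rfl
        have hsR : s[kR] = 'R' := by simpa using hgR
        have hw : ∀ c ∈ s.take kR, c ≠ 'R' ∧ c ≠ 'L' := by
          intro x hx
          have hxL : x ∈ s.take kL := by
            have hxx : x ∈ (s.take kL).take kR := by
              rw [List.take_take]
              rwa [Nat.min_eq_left (le_of_lt hcmp)]
            exact List.mem_of_mem_take hxx
          refine ⟨?_, ?_⟩
          · simpa using List.false_of_mem_take_findIdx (p := (· == 'R')) hx
          · simpa using List.false_of_mem_take_findIdx (p := (· == 'L')) hxL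
        have hsplit : s = s.take kR ++ 'R' :: s.drop (kR + 1) := by
          conv_lhs => rw [← List.take_append_drop kR s]
          rw [← List.getElem_cons_drop hkRlt, hsR]
        rw [if_pos (by omega)]
        rw [PySem.List.slice_natCast_add]
        rw [← hs]
        have hcast : ((k : Int) + (kR : Int) + 1) = ((k + kR + 1 : Nat) : Int) := by push_cast; ring
        rw [hcast]
        have hk' : k + kR + 1 ≤ cs.length := by omega
        have hdd : cs.drop (k + kR + 1) = s.drop (kR + 1) := by
          rw [hs, List.drop_drop]
          congr 1
        have hL' : ((if ((k : Int) + (kL : Int)) = -1 then (cs.length : Int) else (k : Int) + (kL : Int))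
            = ((k + kR + 1 : Nat) : Int) + ((cs.drop (k + kR + 1)).findIdx (· == 'L') : Int)) := by
          rw [if_neg (by omega), hdd]
          have hwlen : (s.take kR).length = kR := by simp [List.length_take]; omega
          have hwL : (s.take kR).findIdx (· == 'L') = (s.take kR).length :=
            List.findIdx_eq_length.mpr (fun x hx => by
              simp only [beq_eq_false_iff_ne]
              exact (hw x hx).2)
          have hkLeq : kL = (s.drop (kR + 1)).findIdx (· == 'L') + 1 + kR := by
            rw [hkL]
            conv_lhs => rw [hsplit]
            rw [List.findIdx_append, if_neg (by omega), List.findIdx_cons]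
            simp [hwlen]
          omega
        rw [ih (k + kR + 1) _ _ _ hk' (by omega) (nrmFind cs 'R' (k + kR + 1) hk') hL']
        rw [hdd]
        conv_rhs => rw [hsplit]
        rw [pairsAux_nonletter _ hw, lastAux_nonletter _ hw]
        simp [pairsAux, lastAux]
      · -- an 'L' comes first, or no letter remains
        by_cases hLlt : kL < s.length
        · have hcmp2 : kL < kR := by
            rcases Nat.lt_or_ge kL kR with h | h
            · exact h
            · exfalso
              have hEq : kR = kL := by omega
              obtain ⟨hgL, _⟩ := (List.findIdx_eq (p := (· == 'L')) hLlt).mp rfl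
              have hkRlt' : kR < s.length := by omega
              obtain ⟨hgR, _⟩ := (List.findIdx_eq (p := (· == 'R')) hkRlt').mp rfl
              have h1 : s[kL]? = some 'L' := by
                rw [List.getElem?_eq_getElem hLlt]
                simpa using hgL
              have h2 : s[kR]? = some 'R' := by
                rw [List.getElem?_eq_getElem hkRlt']
                simpa using hgR
              rw [hEq, h1] at h2
              simp at h2
          obtain ⟨hgL, hbL⟩ := (List.findIdx_eq (p := (· == 'L')) hLlt).mp rfl
          have hsL : s[kL] = 'L' := by simpa using hgL
          have hw : ∀ c ∈ s.take kL, c ≠ 'R' ∧ c ≠ 'L' := by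
            intro x hx
            have hxR : x ∈ s.take kR := by
              have hxx : x ∈ (s.take kR).take kL := by
                rw [List.take_take]
                rwa [Nat.min_eq_left (le_of_lt hcmp2)]
              exact List.mem_of_mem_take hxx
            refine ⟨?_, ?_⟩
            · simpa using List.false_of_mem_take_findIdx (p := (· == 'R')) hxR
            · simpa using List.false_of_mem_take_findIdx (p := (· == 'L')) hx
          have hsplit : s = s.take kL ++ 'L' :: s.drop (kL + 1) := by
            conv_lhs => rw [← List.take_append_drop kL s]
            rw [← List.getElem_cons_drop hLlt, hsL]
          rw [if_neg (by omega)]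
          rw [PySem.List.slice_natCast_add]
          rw [← hs]
          have hcast : ((k : Int) + (kL : Int) + 1) = ((k + kL + 1 : Nat) : Int) := by push_cast; ring
          rw [hcast]
          have hk' : k + kL + 1 ≤ cs.length := by omega
          have hdd : cs.drop (k + kL + 1) = s.drop (kL + 1) := by
            rw [hs, List.drop_drop]
            congr 1
          have hR' : ((if ((k : Int) + (kR : Int)) = -1 then (cs.length : Int) else (k : Int) + (kR : Int))
              = ((k + kL + 1 : Nat) : Int) + ((cs.drop (k + kL + 1)).findIdx (· == 'R') : Int)) := by
            rw [if_neg (by omega), hdd]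
            have hwlen : (s.take kL).length = kL := by simp [List.length_take]; omega
            have hwR : (s.take kL).findIdx (· == 'R') = (s.take kL).length :=
              List.findIdx_eq_length.mpr (fun x hx => by
                simp only [beq_eq_false_iff_ne]
                exact (hw x hx).1)
            have hkReq : kR = (s.drop (kL + 1)).findIdx (· == 'R') + 1 + kL := by
              rw [hkR]
              conv_lhs => rw [hsplit]
              rw [List.findIdx_append, if_neg (by omega), List.findIdx_cons]
              simp [hwlen]
            omega
          rw [ih (k + kL + 1) _ _ _ hk' (by omega) hR' (nrmFind cs 'L' (k + kL + 1) hk')]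
          rw [hdd]
          conv_rhs => rw [hsplit]
          rw [pairsAux_nonletter _ hw, lastAux_nonletter _ hw]
          simp [pairsAux, lastAux]
        · -- no letter remains: final chunk, then the loop exits
          have hkLe : kL = s.length := by omega
          have hkRe : kR = s.length := by omega
          have hw : ∀ c ∈ s, c ≠ 'R' ∧ c ≠ 'L' := by
            intro x hx
            constructor
            · intro hxR
              have := List.findIdx_eq_length.mp hkRe x hx
              rw [hxR] at this
              simp at this
            · intro hxL
              have := List.findIdx_eq_length.mp hkLe x hx
              rw [hxL] at this
              simp at this
          have hpa : pairsAux [] s = [] := by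
            have := pairsAux_nonletter s hw [] []
            simpa using this
          have hla : lastAux [] s = s := by
            have := lastAux_nonletter s hw [] []
            simpa using this
          rw [if_neg (by omega)]
          rw [PySem.List.slice_natCast_add]
          rw [← hs]
          have htk : (cs.drop k).take kL = s := by rw [← hs, hkLe, List.take_length]
          rw [htk]
          cases fuel with
          | zero => omega
          | succ g =>
            simp only [parseLoopA]
            rw [if_neg (by omega)]
            rw [hpa, hla, if_neg hsne]
            simp
    · -- k = cs.length: loop guard fails
      have hke : k = cs.length := by omega
      have hnil : cs.drop k = [] := List.drop_eq_nil_of_le (by omega)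
      simp only [parseLoopA, hnil, pairsAux, lastAux]
      rw [if_neg (by exact_mod_cast (by omega : ¬ (k : Int) < (cs.length : Int)))]
      simp

-- both ports compute pairsAux/lastAux of the whole string, then the same final-chunk fix-up
lemma parse_ins_eq (ins : String) : parse_ins ins = parse_ins_alt ins := by
  simp only [parse_ins, parse_ins_alt]
  set cs := ins.toList with hcs
  have hR0 : (if PySem.Chars.find cs ['R'] = -1 then (cs.length : Int) else PySem.Chars.find cs ['R'])
      = ((0 : Nat) : Int) + ((cs.drop 0).findIdx (· == 'R') : Int) := by
    have := nrmFind cs 'R' 0 (Nat.zero_le _)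
    rwa [Nat.cast_zero, PySem.Chars.findFrom_zero] at this
  have hL0 : (if PySem.Chars.find cs ['L'] = -1 then (cs.length : Int) else PySem.Chars.find cs ['L'])
      = ((0 : Nat) : Int) + ((cs.drop 0).findIdx (· == 'L') : Int) := by
    have := nrmFind cs 'L' 0 (Nat.zero_le _)
    rwa [Nat.cast_zero, PySem.Chars.findFrom_zero] at this
  have hloop := loopA_eq cs (cs.length + 1) 0 (PySem.Chars.find cs ['R']) (PySem.Chars.find cs ['L'])
    [] (Nat.zero_le _) (by omega) hR0 hL0
  simp only [Nat.cast_zero, List.drop_zero, List.nil_append] at hloop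
  rw [hloop, foldl_parseStep]
  by_cases hw : lastAux [] cs = []
  · simp [hw]
  · rw [if_neg hw]
    simp only [ne_eq, hw, not_false_iff, if_true]
    rw [List.getLast?_concat, List.dropLast_concat]
    simp

-- ===== VERDICT (by name: the statement is the Claim_ definition above) =====
theorem parse_ins_spec : Claim_equal_parse_ins := by
  intro ins _ _
  exact parse_ins_eq ins
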